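-- pv_equiv track=rewrite | github.com/az365/snakee | utils/mappers.py | get_first_values
-- ===== SOURCE A (Python) =====
-- def get_first_values(records, fields):
--     dict_first_values = dict()
--     empty_fields = fields.copy()
--     for r in records:
--         added_fields = list()
--         for f in empty_fields:
--             v = r.get(f)
--             if v:
--                 dict_first_values[f] = v
--                 added_fields.append(f)
--         for f in added_fields:
--             empty_fields.remove(f)
--     return dict_first_values
-- ===== SOURCE B (Python) =====
-- def get_first_values(records, fields):
--     def go(recs, flds):
--         if not recs:
--             return {}
--         r = recs[0]
--         found = {f: r.get(f) for f in flds if r.get(f)}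
--         remaining = [f for f in flds if not r.get(f)]
--         return {**found, **go(recs[1:], remaining)}
--     return go(list(records), fields)
-- ===== Notes on version B (the rewrite author's own statement) =====
-- stated objective: simpler
-- what changed: Replaces A's imperative loop with mutable dict + empty_fields bookkeeping (appending to added_fields, then list.remove in a second pass) by a structural recursion on records: each step partitions the pending fields with two comprehensions (found / remaining) and merges found with the recursive result, with no mutation.
import Mathlib
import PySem

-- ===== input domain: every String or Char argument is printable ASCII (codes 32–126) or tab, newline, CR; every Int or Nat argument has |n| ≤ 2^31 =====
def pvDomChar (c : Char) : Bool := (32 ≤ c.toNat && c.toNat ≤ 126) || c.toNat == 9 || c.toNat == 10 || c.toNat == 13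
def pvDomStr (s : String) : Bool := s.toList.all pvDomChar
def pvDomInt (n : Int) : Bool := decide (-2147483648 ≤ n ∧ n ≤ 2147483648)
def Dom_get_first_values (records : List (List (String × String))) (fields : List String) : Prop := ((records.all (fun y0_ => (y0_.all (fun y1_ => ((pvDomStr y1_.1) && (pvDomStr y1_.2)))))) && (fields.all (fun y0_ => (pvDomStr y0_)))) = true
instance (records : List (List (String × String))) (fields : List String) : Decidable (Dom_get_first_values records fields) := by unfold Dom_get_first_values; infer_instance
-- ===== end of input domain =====

-- B replaces A's imperative loop (mutable dict + empty_fields with list.remove bookkeeping) by a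
-- structural recursion on records that partitions the pending fields per record; return values agree
-- exactly, neither version mutates its arguments (A copies `fields`).

-- ===== PORT A =====
-- inner loop body: `v = r.get(f); if v: dict_first_values[f] = v; added_fields.append(f)`
def pvInnerStep (r : List (String × String)) (st2 : PySem.Dict String String × List String) (f : String) : PySem.Dict String String × List String :=
  match (PySem.Dict.mk r).get? f with
  | some v => if v == "" then st2 else (st2.1.insert f v, st2.2 ++ [f])
  | none => st2

-- `empty_fields.remove(f)` (f is always present when A calls it, so the getD default is never used)
def pvRemoveStep (ef : List String) (f : String) : List String := (PySem.List.remove? ef f).getD ef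

-- body of `for r in records:` over the state (dict_first_values, empty_fields)
def pvOuterStep (st : PySem.Dict String String × List String) (r : List (String × String)) : PySem.Dict String String × List String :=
  let inner := st.2.foldl (pvInnerStep r) (st.1, ([] : List String))
  (inner.1, inner.2.foldl pvRemoveStep st.2)

def get_first_values (records : List (List (String × String))) (fields : List String) : List (String × String) :=
  (records.foldl pvOuterStep (PySem.Dict.empty, fields)).1.items

-- ===== PORT B =====
-- Python truthiness of r.get(f) is false: None (key absent) or the empty string
def pvFalsy (r : List (String × String)) (f : String) : Bool :=
  match (PySem.Dict.mk r).get? f with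
  | some v => v == ""
  | none => true

-- one step of the dict comprehension `{f: r.get(f) for f in flds if r.get(f)}`
def pvDStep (r : List (String × String)) (d : PySem.Dict String String) (f : String) : PySem.Dict String String :=
  match (PySem.Dict.mk r).get? f with
  | some v => if v == "" then d else d.insert f v
  | none => d

-- `found = {f: r.get(f) for f in flds if r.get(f)}`
def pvFound (r : List (String × String)) (flds : List String) : PySem.Dict String String :=
  flds.foldl (pvDStep r) PySem.Dict.empty

-- `go(recs, flds)` of Source B: recursion on the record list
def pvGo : List (List (String × String)) → List String → PySem.Dict String String
  | [], _ => PySem.Dict.empty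
  | r :: rest, flds =>
    let found := pvFound r flds
    let remaining := flds.filter (pvFalsy r)   -- `[f for f in flds if not r.get(f)]`
    PySem.Dict.update found (pvGo rest remaining).items   -- `{**found, **go(rest, remaining)}`

def get_first_values_alt (records : List (List (String × String))) (fields : List String) : List (String × String) :=
  (pvGo records fields).items

-- ===== PRECONDITION & SPEC =====
def Spec_get_first_values (records : List (List (String × String))) (fields : List String) (out : List (String × String)) : Prop := out = get_first_values_alt records fields
instance (records : List (List (String × String))) (fields : List String) (out : List (String × String)) : Decidable (Spec_get_first_values records fields out) := by unfold Spec_get_first_values; infer_instance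

-- ===== CLAIM (what is proved, stated in full; the proofs are below) =====
def Claim_equal_get_first_values : Prop := ∀ (records : List (List (String × String))) (fields : List String), Dom_get_first_values records fields → Spec_get_first_values records fields (get_first_values records fields)

-- ===== LEMMAS AND PROOFS =====

-- the dict component of A's inner loop is B's `found` fold (the added-fields list never feeds back)
theorem inner_fst (r : List (String × String)) :
    ∀ (flds : List String) (d : PySem.Dict String String) (l : List String),
      (flds.foldl (pvInnerStep r) (d, l)).1 = flds.foldl (pvDStep r) d := by
  intro flds
  induction flds with
  | nil => intro d l; rfl
  | cons f fs ih =>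
    intro d l
    simp only [List.foldl_cons, pvInnerStep, pvDStep]
    cases h : (PySem.Dict.mk r).get? f with
    | none => exact ih d l
    | some v =>
      by_cases hv : v == ""
      · simp [hv, ih]
      · simp [hv, ih]

-- the added-fields component of A's inner loop is the truthy filter
theorem inner_snd (r : List (String × String)) :
    ∀ (flds : List String) (d : PySem.Dict String String) (l : List String),
      (flds.foldl (pvInnerStep r) (d, l)).2 = l ++ flds.filter (fun f => !(pvFalsy r f)) := by
  intro flds
  induction flds with
  | nil => intro d l; simp
  | cons f fs ih =>
    intro d l
    simp only [List.foldl_cons, pvInnerStep, List.filter_cons, pvFalsy]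
    cases h : (PySem.Dict.mk r).get? f with
    | none => simpa using ih d l
    | some v =>
      by_cases hv : v == ""
      · simpa [hv] using ih d l
      · simp only [hv, Bool.not_false]
        simpa [hv] using ih (d.insert f v) (l ++ [f])


-- Dict.mk is left inverse to items
theorem mk_items (d : PySem.Dict String String) : PySem.Dict.mk d.items = d := by
  cases d; rfl

theorem contains_mk_append (l1 l2 : List (String × String)) (f : String) :
    (PySem.Dict.mk (l1 ++ l2)).contains f
      = ((PySem.Dict.mk l1).contains f || (PySem.Dict.mk l2).contains f) := by
  simp [PySem.Dict.contains, List.any_append]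

-- inserting a key absent from the left block happens entirely in the right block
theorem insert_append (dI eI : List (String × String)) (f : String) (v : String)
    (h : (PySem.Dict.mk dI).contains f = false) :
    ((PySem.Dict.mk (dI ++ eI)).insert f v).items = dI ++ ((PySem.Dict.mk eI).insert f v).items := by
  have hca : (PySem.Dict.mk (dI ++ eI)).contains f = (PySem.Dict.mk eI).contains f := by
    rw [contains_mk_append, h]; simp
  by_cases he : (PySem.Dict.mk eI).contains f = true
  · rw [PySem.Dict.items_insert_of_contains _ _ (by rw [hca]; exact he),
        PySem.Dict.items_insert_of_contains _ _ he]
    simp only [List.map_append]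
    congr 1
    conv_rhs => rw [← List.map_id dI]
    apply List.map_congr_left
    intro p hp
    have : (p.1 == f) = false := by
      by_contra hcon
      have : (PySem.Dict.mk dI).contains f = true := by
        simp only [PySem.Dict.contains, List.any_eq_true]
        exact ⟨p, hp, by simpa using hcon⟩
      simp [this] at h
    simp [this]
  · have he' : (PySem.Dict.mk eI).contains f = false := eq_false_of_ne_true he
    rw [PySem.Dict.items_insert_of_not_contains _ _ (by rw [hca]; exact he'),
        PySem.Dict.items_insert_of_not_contains _ _ he']
    simp

-- the found-fold over a dict whose left block never contains a truthy field splits off that block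
theorem found_fold_append (r : List (String × String)) :
    ∀ (flds : List String) (dI eI : List (String × String)),
      (∀ f ∈ flds, pvFalsy r f = false → (PySem.Dict.mk dI).contains f = false) →
      (flds.foldl (pvDStep r) (PySem.Dict.mk (dI ++ eI))).items
        = dI ++ (flds.foldl (pvDStep r) (PySem.Dict.mk eI)).items := by
  intro flds
  induction flds with
  | nil => intro dI eI h; simp
  | cons f fs ih =>
    intro dI eI h
    simp only [List.foldl_cons, pvDStep]
    cases hg : (PySem.Dict.mk r).get? f with
    | none => exact ih dI eI (fun g hg' => h g (by simp [hg']))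
    | some v =>
      by_cases hv : v == ""
      · simp only [hv, if_true]
        exact ih dI eI (fun g hg' => h g (by simp [hg']))
      · simp only [hv, if_false, Bool.false_eq_true]
        have hfalsy : pvFalsy r f = false := by simp [pvFalsy, hg, hv]
        have hdI : (PySem.Dict.mk dI).contains f = false := h f (by simp) hfalsy
        have hins : (PySem.Dict.mk (dI ++ eI)).insert f v
            = PySem.Dict.mk (dI ++ ((PySem.Dict.mk eI).insert f v).items) := by
          apply PySem.Dict.ext
          rw [insert_append dI eI f v hdI]
        rw [hins, ih dI _ (fun g hg' => h g (by simp [hg'])),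
            mk_items]

theorem found_fold_items (r : List (String × String)) (flds : List String) (d : PySem.Dict String String)
    (h : ∀ f ∈ flds, pvFalsy r f = false → d.contains f = false) :
    (flds.foldl (pvDStep r) d).items = d.items ++ (pvFound r flds).items := by
  have := found_fold_append r flds d.items [] (by simpa [mk_items] using h)
  simpa [mk_items, pvFound, PySem.Dict.empty] using this

-- keys produced by the found-fold come from d or from truthy fields of flds
theorem keys_found_fold (r : List (String × String)) :
    ∀ (flds : List String) (d : PySem.Dict String String) (f : String),
      f ∈ (flds.foldl (pvDStep r) d).keys → f ∈ d.keys ∨ (f ∈ flds ∧ pvFalsy r f = false) := by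
  intro flds
  induction flds with
  | nil => intro d f hf; exact Or.inl hf
  | cons g gs ih =>
    intro d f hf
    simp only [List.foldl_cons, pvDStep] at hf
    cases hg : (PySem.Dict.mk r).get? g with
    | none =>
      rw [hg] at hf
      rcases ih d f hf with h1 | ⟨h1, h2⟩
      · exact Or.inl h1
      · exact Or.inr ⟨by simp [h1], h2⟩
    | some v =>
      rw [hg] at hf
      by_cases hv : v == ""
      · simp only [hv, if_true] at hf
        rcases ih d f hf with h1 | ⟨h1, h2⟩
        · exact Or.inl h1
        · exact Or.inr ⟨by simp [h1], h2⟩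
      · simp only [hv, if_false, Bool.false_eq_true] at hf
        rcases ih (d.insert g v) f hf with h1 | ⟨h1, h2⟩
        · rcases (PySem.Dict.mem_keys_insert _ _ _ _).1 h1 with h3 | h3
          · subst h3; exact Or.inr ⟨by simp, by simp [pvFalsy, hg, hv]⟩
          · exact Or.inl h3
        · exact Or.inr ⟨by simp [h1], h2⟩

theorem nodup_keys_found_fold (r : List (String × String)) :
    ∀ (flds : List String) (d : PySem.Dict String String),
      d.keys.Nodup → (flds.foldl (pvDStep r) d).keys.Nodup := by
  intro flds
  induction flds with
  | nil => intro d h; exact h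
  | cons g gs ih =>
    intro d h
    simp only [List.foldl_cons, pvDStep]
    cases hg : (PySem.Dict.mk r).get? g with
    | none => exact ih d h
    | some v =>
      by_cases hv : v == ""
      · simp only [hv, if_true]; exact ih d h
      · simp only [hv, if_false, Bool.false_eq_true]
        exact ih _ (PySem.Dict.nodup_keys_insert _ _ _ h)

theorem keys_update_sub (f : String) :
    ∀ (ps : List (String × String)) (d : PySem.Dict String String),
      f ∈ (PySem.Dict.update d ps).keys → f ∈ d.keys ∨ f ∈ ps.map Prod.fst := by
  intro ps
  induction ps with
  | nil => intro d h; exact Or.inl h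
  | cons p ps ih =>
    intro d h
    simp only [PySem.Dict.update, List.foldl_cons] at h
    rcases ih (d.insert p.1 p.2) (by simpa [PySem.Dict.update] using h) with h1 | h1
    · rcases (PySem.Dict.mem_keys_insert _ _ _ _).1 h1 with h2 | h2
      · exact Or.inr (by simp [h2])
      · exact Or.inl h2
    · exact Or.inr (by simp; right; simpa using h1)

theorem keys_pvGo (f : String) :
    ∀ (recs : List (List (String × String))) (flds : List String),
      f ∈ (pvGo recs flds).keys → f ∈ flds := by
  intro recs
  induction recs with
  | nil => intro flds h; simp [pvGo, PySem.Dict.empty, PySem.Dict.keys] at h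
  | cons r rest ih =>
    intro flds h
    simp only [pvGo] at h
    rcases keys_update_sub f _ _ h with h1 | h1
    · rcases keys_found_fold r flds _ f (by simpa [pvFound] using h1) with h2 | ⟨h2, _⟩
      · simp [PySem.Dict.empty, PySem.Dict.keys] at h2
      · exact h2
    · have : f ∈ (pvGo rest (flds.filter (pvFalsy r))).keys := by
        simpa [PySem.Dict.keys] using h1
      exact List.mem_of_mem_filter (ih _ this)

theorem nodup_keys_pvGo : ∀ (recs : List (List (String × String))) (flds : List String),
    (pvGo recs flds).keys.Nodup := by
  intro recs
  induction recs with
  | nil => intro flds; simp [pvGo, PySem.Dict.empty, PySem.Dict.keys]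
  | cons r rest ih =>
    intro flds
    simp only [pvGo]
    apply PySem.Dict.nodup_keys_update
    exact nodup_keys_found_fold r flds _ (by simp [PySem.Dict.empty, PySem.Dict.keys])

-- removing elements that all fail to be x walks past a leading x
theorem remove_fold_cons (p : String → Bool) :
    ∀ (ys : List String) (x : String) (xs : List String),
      (∀ f ∈ ys, p f = true) → p x = false →
      ys.foldl pvRemoveStep (x :: xs) = x :: ys.foldl pvRemoveStep xs := by
  intro ys
  induction ys with
  | nil => intro x xs _ _; rfl
  | cons f fs ih =>
    intro x xs hall hx
    have hne : x ≠ f := by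
      intro hcon; rw [hcon] at hx; rw [hall f (by simp)] at hx; cases hx
    have hstep : pvRemoveStep (x :: xs) f = x :: pvRemoveStep xs f := by
      unfold pvRemoveStep
      rw [PySem.List.remove?_cons_of_ne xs hne]
      cases PySem.List.remove? xs f <;> simp
    simp only [List.foldl_cons, hstep]
    exact ih x _ (fun g hg => hall g (by simp [hg])) hx

-- A's removal pass: removing every p-element of l from l leaves exactly the non-p elements
theorem remove_fold_filter (p : String → Bool) :
    ∀ (l : List String), (l.filter p).foldl pvRemoveStep l = l.filter (fun x => !p x) := by
  intro l
  induction l with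
  | nil => rfl
  | cons x xs ih =>
    by_cases hx : p x
    · simp only [List.filter_cons, hx, if_true, List.foldl_cons, Bool.not_true]
      have : pvRemoveStep (x :: xs) x = xs := by
        unfold pvRemoveStep; rw [PySem.List.remove?_cons_self]; rfl
      simp only [this, ih]
      simp
    · have hx' : p x = false := eq_false_of_ne_true hx
      simp only [List.filter_cons, hx', Bool.false_eq_true, if_false, Bool.not_false]
      rw [remove_fold_cons p _ x xs (fun f hf => (List.mem_filter.1 hf).2) hx', ih]
      simp

-- {**found, **tail} appends when tail's keys are fresh and distinct
theorem update_fresh (d : PySem.Dict String String) (ps : List (String × String))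
    (h : ∀ p ∈ ps, d.contains p.1 = false) (hnd : (ps.map Prod.fst).Nodup) :
    (PySem.Dict.update d ps).items = d.items ++ ps := by
  have := PySem.Dict.items_foldl_insert_fresh ps Prod.fst Prod.snd d h hnd
  simpa [PySem.Dict.update] using this

-- the outer loop starting from state (d, flds) with flds fresh for d appends B's recursion
theorem outer_main :
    ∀ (recs : List (List (String × String))) (flds : List String) (d : PySem.Dict String String),
      (∀ f ∈ flds, d.contains f = false) →
      (recs.foldl pvOuterStep (d, flds)).1.items = d.items ++ (pvGo recs flds).items := by
  intro recs
  induction recs with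
  | nil => intro flds d _; simp [pvGo, PySem.Dict.empty]
  | cons r rest ih =>
    intro flds d hfresh
    have hdstep : ∀ f ∈ flds, pvFalsy r f = false → d.contains f = false :=
      fun f hf _ => hfresh f hf
    have hitems : (flds.foldl (pvDStep r) d).items = d.items ++ (pvFound r flds).items :=
      found_fold_items r flds d hdstep
    have houter : pvOuterStep (d, flds) r
        = (PySem.Dict.mk (d.items ++ (pvFound r flds).items), flds.filter (pvFalsy r)) := by
      unfold pvOuterStep
      have h1 : (flds.foldl (pvInnerStep r) (d, ([] : List String))).1 = flds.foldl (pvDStep r) d :=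
        inner_fst r flds d []
      have h2 : (flds.foldl (pvInnerStep r) (d, ([] : List String))).2
          = flds.filter (fun f => !(pvFalsy r f)) := by
        simpa using inner_snd r flds d []
      refine Prod.ext ?_ ?_
      · show (flds.foldl (pvInnerStep r) (d, ([] : List String))).1 = _
        rw [h1]
        apply PySem.Dict.ext
        exact hitems
      · show (flds.foldl (pvInnerStep r) (d, ([] : List String))).2.foldl pvRemoveStep flds = _
        rw [h2]
        have := remove_fold_filter (fun f => !(pvFalsy r f)) flds
        rw [this]
        exact List.filter_congr (fun f _ => by simp)
    have hkey_found : ∀ f, (pvFound r flds).contains f = true → pvFalsy r f = false := by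
      intro f hf
      have hmem := (PySem.Dict.contains_iff_mem_keys _ _).1 hf
      rcases keys_found_fold r flds PySem.Dict.empty f (by simpa [pvFound] using hmem) with h1 | ⟨_, h2⟩
      · simp [PySem.Dict.keys_empty] at h1
      · exact h2
    have hfresh' : ∀ f ∈ flds.filter (pvFalsy r),
        (PySem.Dict.mk (d.items ++ (pvFound r flds).items)).contains f = false := by
      intro f hf
      have hfl := List.mem_filter.1 hf
      rw [contains_mk_append, mk_items, mk_items]
      have hd : d.contains f = false := hfresh f hfl.1
      have hfo : (pvFound r flds).contains f = false := by
        by_contra hcon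
        have : (pvFound r flds).contains f = true := by
          cases hc : (pvFound r flds).contains f
          · exact absurd hc hcon
          · rfl
        rw [hkey_found f this] at hfl
        cases hfl.2
      rw [hd, hfo]; rfl
    simp only [List.foldl_cons, houter]
    rw [ih (flds.filter (pvFalsy r)) _ hfresh']
    have hB : (pvGo (r :: rest) flds).items
        = (pvFound r flds).items ++ (pvGo rest (flds.filter (pvFalsy r))).items := by
      show (PySem.Dict.update (pvFound r flds) (pvGo rest (flds.filter (pvFalsy r))).items).items = _
      apply update_fresh
      · intro p hp
        have hk : p.1 ∈ (pvGo rest (flds.filter (pvFalsy r))).keys := by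
          simp only [PySem.Dict.keys]
          exact List.mem_map.2 ⟨p, hp, rfl⟩
        have hrem := keys_pvGo p.1 _ _ hk
        have hfal : pvFalsy r p.1 = true := (List.mem_filter.1 hrem).2
        by_contra hcon
        have hct : (pvFound r flds).contains p.1 = true := by
          cases hc : (pvFound r flds).contains p.1
          · exact absurd hc hcon
          · rfl
        rw [hkey_found p.1 hct] at hfal
        cases hfal
      · exact nodup_keys_pvGo rest _
    rw [hB, List.append_assoc]

-- ===== VERDICT (by name: the statement is the Claim_ definition above) =====
theorem get_first_values_spec : Claim_equal_get_first_values := by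
  intro records fields _
  unfold Spec_get_first_values get_first_values get_first_values_alt
  have := outer_main records fields PySem.Dict.empty (fun f _ => PySem.Dict.contains_empty f)
  simpa [PySem.Dict.empty] using this
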